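-- pv_equiv track=rewrite | github.com/nofrisnanda/HandwrittenLetter-Recognition-ELM-HOG | HOG + TestingELM.py | label_testing
-- ===== SOURCE A (Python) =====
-- def label_testing(target):
--     k = 0
--     sign = [99,199,299,399,499,599,699,799,899,999,1099,1199,1299,1399,1499,1599,1699,1799,1899,1999,2099,2199,2299,2399,2499]
--     for i in range(len(target)):
--         target[i][0] += k
--         if i in sign:
--             k += 1
--     return target
-- ===== SOURCE B (Python) =====
-- def label_testing(target):
--     # closed form: the running counter at row i equals min(i // 100, 25)
--     return [[row[0] + min(i // 100, 25)] + row[1:] for i, row in enumerate(target)]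
-- ===== Notes on version B (the rewrite author's own statement) =====
-- stated objective: simpler
-- what changed: Replaces the incremental counter and the 25-element sentinel list (with a membership test per row) by the closed form min(i // 100, 25) applied in a single comprehension; note A mutates target in place while B returns a fresh list (return value proved equal).
import Mathlib
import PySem

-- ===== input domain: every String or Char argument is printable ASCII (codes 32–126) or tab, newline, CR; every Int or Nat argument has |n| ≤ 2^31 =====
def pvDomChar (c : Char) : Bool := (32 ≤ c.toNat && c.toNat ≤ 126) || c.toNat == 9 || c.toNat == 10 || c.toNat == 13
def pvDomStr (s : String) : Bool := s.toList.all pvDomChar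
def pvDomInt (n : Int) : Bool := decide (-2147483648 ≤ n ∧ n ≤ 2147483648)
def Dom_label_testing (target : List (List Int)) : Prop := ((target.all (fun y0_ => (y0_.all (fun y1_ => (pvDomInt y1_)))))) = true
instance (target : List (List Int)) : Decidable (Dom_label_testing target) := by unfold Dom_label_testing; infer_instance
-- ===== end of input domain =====

-- B replaces A's incremental counter + sentinel-membership loop by the closed form
-- min(i // 100, 25) in a single comprehension (simpler); A mutates target in place,
-- B returns a fresh list — the equivalence proved here is about the RETURN value.

-- ===== PORT A =====
def label_testing (target : List (List Int)) : List (List Int) :=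
  let sign : List Int := [99,199,299,399,499,599,699,799,899,999,1099,1199,1299,1399,1499,1599,1699,1799,1899,1999,2099,2199,2299,2399,2499]
  ((PySem.List.pyRange 0 (target.length : Int) 1).foldl
    (fun (st : Int × List (List Int)) i =>
      let row := PySem.List.pyGetD st.2 i []
      let row' := match row with
        | x :: xs => (x + st.1) :: xs
        | [] => []   -- Python raises IndexError on an empty row; excluded by Pre_
      let t := PySem.List.pySetD st.2 i row'
      (if i ∈ sign then st.1 + 1 else st.1, t))
    (0, target)).2

-- ===== PORT B =====
def label_testing_alt (target : List (List Int)) : List (List Int) :=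
  (PySem.List.enumerate target).map (fun p =>
    match p.2 with
    | x :: xs => (x + min (PySem.Int.floordiv p.1 100) 25) :: xs
    | [] => [])   -- Python raises IndexError on an empty row; excluded by Pre_

-- ===== PRECONDITION & SPEC =====
-- Pre_ excludes exactly the inputs with an empty row, on which both Pythons raise IndexError.
def Pre_label_testing (target : List (List Int)) : Prop := ∀ row ∈ target, row ≠ []
instance (target : List (List Int)) : Decidable (Pre_label_testing target) := by unfold Pre_label_testing; infer_instance
def pvWitness_label_testing : List (List Int) := [[0], [1, 2], [-3]]

def Spec_label_testing (target : List (List Int)) (out : List (List Int)) : Prop := out = label_testing_alt target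
instance (target : List (List Int)) (out : List (List Int)) : Decidable (Spec_label_testing target out) := by unfold Spec_label_testing; infer_instance

-- ===== CLAIM (what is proved, stated in full; the proofs are below) =====
def Claim_equal_label_testing : Prop := ∀ (target : List (List Int)), Dom_label_testing target → Pre_label_testing target → Spec_label_testing target (label_testing target)

-- ===== LEMMAS AND PROOFS =====

-- the closed-form counter value before processing row m
def pvK (m : Nat) : Int := ((min (m / 100) 25 : Nat) : Int)

def pvG (i : Int) (row : List Int) : List Int :=
  match row with
  | x :: xs => (x + min (PySem.Int.floordiv i 100) 25) :: xs
  | [] => []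

def pvSign : List Int := [99,199,299,399,499,599,699,799,899,999,1099,1199,1299,1399,1499,1599,1699,1799,1899,1999,2099,2199,2299,2399,2499]

lemma pvK_step (m : Nat) :
    (if (m : Int) ∈ pvSign then pvK m + 1 else pvK m) = pvK (m + 1) := by
  have hmem : ((m : Int) ∈ pvSign) ↔ (m % 100 = 99 ∧ m ≤ 2499) := by
    simp only [pvSign, List.mem_cons, List.not_mem_nil, or_false]
    constructor
    · rintro (h|h|h|h|h|h|h|h|h|h|h|h|h|h|h|h|h|h|h|h|h|h|h|h|h) <;> omega
    · intro ⟨h1, h2⟩; omega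
  by_cases h : (m : Int) ∈ pvSign
  · rw [if_pos h]; rw [hmem] at h; unfold pvK; push_cast; omega
  · rw [if_neg h]; rw [hmem] at h; unfold pvK; push_cast; omega

lemma pvG_eq (m : Nat) (row : List Int) :
    pvG (m : Int) row = (match row with | x :: xs => (x + pvK m) :: xs | [] => []) := by
  have h2 : min ((m : Int) / 100) 25 = pvK m := by unfold pvK; push_cast; omega
  cases row <;> simp [pvG, h2]

-- partial result: rows with index < m transformed, the rest untouched
def pvOut (target : List (List Int)) (m : Nat) : List (List Int) :=
  (PySem.List.enumerate target).map (fun p => if p.1 < (m : Int) then pvG p.1 p.2 else p.2)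

lemma length_pvOut (target : List (List Int)) (m : Nat) :
    (pvOut target m).length = target.length := by
  simp [pvOut, PySem.List.length_enumerate]

lemma getElem_pvOut (target : List (List Int)) (m j : Nat) (hj : j < target.length) :
    (pvOut target m)[j]'(by rw [length_pvOut]; exact hj) =
      if (j : Int) < (m : Int) then pvG j (target[j]) else target[j] := by
  simp [pvOut, PySem.List.getElem_enumerate]

lemma pvLoop (target : List (List Int)) (m : Nat) (hm : m ≤ target.length) :
    (PySem.List.pyRange 0 (m : Int) 1).foldl
      (fun (st : Int × List (List Int)) i =>
        let row := PySem.List.pyGetD st.2 i []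
        let row' := match row with
          | x :: xs => (x + st.1) :: xs
          | [] => []
        let t := PySem.List.pySetD st.2 i row'
        (if i ∈ pvSign then st.1 + 1 else st.1, t))
      (0, target) = (pvK m, pvOut target m) := by
  induction m with
  | zero =>
    rw [PySem.List.pyRange_one_eq_nil (by norm_num)]
    simp only [List.foldl_nil]
    rw [Prod.mk.injEq]
    constructor
    · rfl
    · apply List.ext_getElem (by rw [length_pvOut])
      intro j h1 h2
      rw [getElem_pvOut target 0 j h1]
      simp
  | succ m ih =>
    have hm' : m ≤ target.length := Nat.le_of_succ_le hm
    have hmlt : m < target.length := hm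
    rw [show ((m + 1 : Nat) : Int) = (m : Int) + 1 by push_cast; ring,
        PySem.List.pyRange_one_succ_right (by positivity), List.foldl_append,
        ih hm']
    simp only [List.foldl_cons, List.foldl_nil]
    have hget : PySem.List.pyGetD (pvOut target m) (m : Int) [] = target[m] := by
      rw [PySem.List.pyGetD_natCast]
      rw [List.getD_eq_getElem _ _ (by rw [length_pvOut]; exact hmlt)]
      rw [getElem_pvOut target m m hmlt]
      simp
    rw [hget]
    rw [Prod.mk.injEq]
    constructor
    · exact pvK_step m
    · rw [PySem.List.pySetD_natCast]
      apply List.ext_getElem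
        (by rw [List.length_set, length_pvOut, length_pvOut])
      intro j h1 h2
      rw [List.getElem_set]
      rw [getElem_pvOut target (m + 1) j (by rw [length_pvOut] at h2; exact h2)]
      by_cases hjm : j = m
      · subst hjm
        rw [if_pos rfl, if_pos (by push_cast; omega)]
        rw [pvG_eq]
      · rw [if_neg (fun h => hjm h.symm)]
        rw [getElem_pvOut target m j (by rw [List.length_set, length_pvOut] at h1; exact h1)]
        have : ((j : Int) < (m : Int)) ↔ ((j : Int) < ((m + 1 : Nat) : Int)) := by
          constructor <;> intro h <;> [push_cast; push_cast at h ⊢] <;> omega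
        by_cases hlt : (j : Int) < (m : Int)
        · rw [if_pos hlt, if_pos (this.mp hlt)]
        · rw [if_neg hlt, if_neg (fun h => hlt (by push_cast at h ⊢; omega))]

lemma pvOut_full (target : List (List Int)) :
    pvOut target target.length = label_testing_alt target := by
  unfold pvOut label_testing_alt
  apply List.map_congr_left
  intro p hp
  rw [PySem.List.mem_enumerate_iff] at hp
  obtain ⟨k, hk, rfl⟩ := hp
  rw [if_pos (by push_cast; omega)]
  rfl

-- ===== VERDICT (by name: the statement is the Claim_ definition above) =====
theorem label_testing_spec : Claim_equal_label_testing := by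
  intro target _ _
  unfold Spec_label_testing label_testing
  simp only [show ([99,199,299,399,499,599,699,799,899,999,1099,1199,1299,1399,1499,1599,1699,1799,1899,1999,2099,2199,2299,2399,2499] : List Int) = pvSign from rfl]
  rw [pvLoop target target.length le_rfl]
  exact pvOut_full target
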